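-- pv_equiv track=rewrite | github.com/SS-Runen/Code-Wars-Scripts | Code Wars ROT13.py | shift_numbers
-- ===== SOURCE A (Python) =====
-- def rotate_left(array, n=1, return_string=False):
--     backup = list(array).copy()
--     new_array = list(array).copy()
--     rotations_done = 0
--     array_length = len(array)
--
--     while rotations_done < n:
--         for index in range(0, array_length-1):
--             new_array[index] = backup[index+1]
--
--         new_array[-1] = backup[0]
--         backup = new_array.copy()
--         rotations_done += 1
--
--     if return_string is True:
--         return ''.join(new_array)
--
--     return new_array
--
-- def rot13number_b(string, rotations=13, return_list=False):
--     lst_numbers = "0123456789"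
--     lst_numbers_shifted = rotate_left(
--         array="0123456789",
--         n=rotations
--     )
--     shift_table = {}
--     str_rotated_string = ""
--
--     for index in range(len(lst_numbers)):
--         num = lst_numbers[index]
--         rotated_num = lst_numbers_shifted[index]
--         shift_table[num] = rotated_num
--
--     for char in string:
--         str_rotated_string += shift_table[char]
--
--     if return_list is True:
--         return list(str_rotated_string)
--
--     return str_rotated_string
--
-- def shift_numbers(string, rotations):
--     lst_rotated = list(string)
--     lst_numberchars = []
--     lst_numberchar_indexes = []
--
--     for index in range(len(string)):
--         char = string[index]
--
--         if char.isnumeric():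
--             lst_numberchars.append(char)
--             lst_numberchar_indexes.append(index)
--
--     lst_numberchars = rot13number_b(
--         string=lst_numberchars,
--         rotations=rotations,
--         return_list=False
--     )
--
--     for index in range(len(lst_numberchars)):
--         numberchar_index = lst_numberchar_indexes[index]
--         lst_rotated[numberchar_index] = lst_numberchars[index]
--
--     return ''.join(lst_rotated)
-- ===== SOURCE B (Python) =====
-- def shift_numbers(string, rotations):
--     shift = rotations % 10 if rotations > 0 else 0
--     table = {str(d): str((d + shift) % 10) for d in range(10)}
--     return ''.join(table[c] if c.isnumeric() else c for c in string)
-- ===== Notes on version B (the rewrite author's own statement) =====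
-- stated objective: simpler
-- what changed: B replaces A's index-gathering pass, the list-copying rotate_left simulation (max(rotations,0) single left rotations) and the reinsertion loop by a digit table computed once with modular arithmetic ((d+shift)%10, shift=rotations%10 if rotations>0 else 0) and a single pass over the string.
import Mathlib
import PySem

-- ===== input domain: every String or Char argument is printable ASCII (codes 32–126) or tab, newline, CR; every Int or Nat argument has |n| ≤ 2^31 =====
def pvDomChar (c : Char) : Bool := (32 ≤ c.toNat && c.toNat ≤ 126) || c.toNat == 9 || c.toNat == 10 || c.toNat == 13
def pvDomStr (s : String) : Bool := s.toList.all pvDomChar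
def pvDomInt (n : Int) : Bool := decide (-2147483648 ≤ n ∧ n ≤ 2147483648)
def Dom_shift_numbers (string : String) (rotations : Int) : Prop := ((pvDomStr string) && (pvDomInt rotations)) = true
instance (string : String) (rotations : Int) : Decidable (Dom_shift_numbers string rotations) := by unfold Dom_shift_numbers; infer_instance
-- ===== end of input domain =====

-- B replaces A's index-gathering / rotate_left / reinsertion pipeline by a digit table built once
-- with modular arithmetic and a single pass over the string (objective: simpler).

-- ===== PORT A =====
-- one body of rotate_left's while loop:
-- for index in range(0, array_length-1): new_array[index] = backup[index+1]; new_array[-1] = backup[0]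
def pvRotStep (backup new_array : List Char) : List Char :=
  let na := (PySem.List.pyRange 0 ((backup.length : Int) - 1) 1).foldl
      (fun na index => PySem.List.pySetD na index (PySem.List.pyGetD backup (index + 1) ' ')) new_array
  PySem.List.pySetD na (-1) (PySem.List.pyGetD backup 0 ' ')

-- 'while rotations_done < n': the loop body runs max(n,0) times; Int.toNat clamps exactly so
def pvRotLoop : Nat → List Char → List Char → List Char
  | 0, _, na => na
  | f + 1, backup, na =>
      let na' := pvRotStep backup na
      pvRotLoop f na' na'

-- rotate_left(array, n) with return_string=False (list in, list out)
def pvRotateLeft (array : List Char) (n : Int) : List Char :=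
  pvRotLoop n.toNat array array

-- shift_table = {}; for index in range(len(lst_numbers)): shift_table[lst_numbers[index]] = lst_numbers_shifted[index]
def pvBuildTable (lst_numbers shifted : List Char) : PySem.Dict Char Char :=
  (PySem.List.pyRange 0 (PySem.List.len lst_numbers) 1).foldl
    (fun t index => t.insert (PySem.List.pyGetD lst_numbers index ' ')
                             (PySem.List.pyGetD shifted index ' ')) PySem.Dict.empty

-- rot13number_b(string=<list of chars>, rotations, return_list=False); the dict keys are the single
-- characters; the lookup default is never reached where Python returns (KeyError would need a
-- numeric char outside '0'..'9', impossible in ASCII)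
def pvRot13number_b (chars : List Char) (rotations : Int) : List Char :=
  let lst_numbers : List Char := "0123456789".toList
  let shifted := pvRotateLeft "0123456789".toList rotations
  let shift_table := pvBuildTable lst_numbers shifted
  chars.foldl (fun acc char => acc ++ [(shift_table.get? char).getD char]) []

-- char.isnumeric() coincides with isdigit on the printable-ASCII domain
def shift_numbers (string : String) (rotations : Int) : String :=
  let s := string.toList
  let p := (PySem.List.pyRange 0 (PySem.Str.len string) 1).foldl
      (fun (p : List Char × List Int) index =>
        let char := PySem.List.pyGetD s index ' '
        if PySem.Chars.isdigit char then (p.1 ++ [char], p.2 ++ [index]) else p)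
      ([], [])
  let lst_numberchars := pvRot13number_b p.1 rotations
  let lst_rotated := (PySem.List.pyRange 0 (PySem.List.len lst_numberchars) 1).foldl
      (fun l index =>
        PySem.List.pySetD l (PySem.List.pyGetD p.2 index 0) (PySem.List.pyGetD lst_numberchars index ' ')) s
  String.ofList lst_rotated

-- ===== PORT B =====
-- table = {str(d): str((d + shift) % 10) for d in range(10)}
def pvAltTable (shift : Int) : PySem.Dict String String :=
  (PySem.List.pyRange 0 10 1).foldl
    (fun t d => t.insert (PySem.Int.toStr d) (PySem.Int.toStr (PySem.Int.mod (d + shift) 10)))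
    PySem.Dict.empty

-- shift = rotations % 10 if rotations > 0 else 0; one pass, join
def shift_numbers_alt (string : String) (rotations : Int) : String :=
  let shift : Int := if rotations > 0 then PySem.Int.mod rotations 10 else 0
  let table := pvAltTable shift
  String.ofList (string.toList.foldl
      (fun acc c =>
        acc ++ (if PySem.Chars.isdigit c
                then ((table.get? (String.ofList [c])).getD (String.ofList [c])).toList
                else [c])) [])

-- ===== PRECONDITION & SPEC =====
def Spec_shift_numbers (string : String) (rotations : Int) (out : String) : Prop := out = shift_numbers_alt string rotations
instance (string : String) (rotations : Int) (out : String) : Decidable (Spec_shift_numbers string rotations out) := by unfold Spec_shift_numbers; infer_instance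

-- ===== CLAIM (what is proved, stated in full; the proofs are below) =====
def Claim_equal_shift_numbers : Prop := ∀ (string : String) (rotations : Int), Dom_shift_numbers string rotations → Spec_shift_numbers string rotations (shift_numbers string rotations)

-- ===== LEMMAS AND PROOFS =====

-- "0123456789" after k single left rotations
def pvDig (k : Nat) : List Char :=
  [Char.ofNat (48 + (0 + k) % 10), Char.ofNat (48 + (1 + k) % 10), Char.ofNat (48 + (2 + k) % 10),
   Char.ofNat (48 + (3 + k) % 10), Char.ofNat (48 + (4 + k) % 10), Char.ofNat (48 + (5 + k) % 10),
   Char.ofNat (48 + (6 + k) % 10), Char.ofNat (48 + (7 + k) % 10), Char.ofNat (48 + (8 + k) % 10),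
   Char.ofNat (48 + (9 + k) % 10)]

-- the per-digit map both programs implement (K = effective number of left rotations)
def pvF (K : Nat) (c : Char) : Char := Char.ofNat (48 + ((c.toNat - 48) + K) % 10)

def pvG (K : Nat) (c : Char) : Char := if PySem.Chars.isdigit c then pvF K c else c

-- indexes (from base) of the digit characters of a list
def pvColI : List Char → Int → List Int
  | [], _ => []
  | c :: r, base =>
      if PySem.Chars.isdigit c then base :: pvColI r (base + 1) else pvColI r (base + 1)

lemma char_toNat_eq (c d : Char) (h : c.toNat = d.toNat) : c = d :=
  Char.ext (UInt32.toNat_inj.mp h)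

lemma digit_bounds (c : Char) (hc : PySem.Chars.isdigit c = true) : 48 ≤ c.toNat ∧ c.toNat ≤ 57 := by
  simp only [PySem.Chars.isdigit, Bool.and_eq_true, decide_eq_true_eq, Char.le_def] at hc
  exact ⟨UInt32.le_iff_toNat_le.mp hc.1, UInt32.le_iff_toNat_le.mp hc.2⟩

lemma pvRotStep_explicit (a b c d e f g h i j : Char) :
    pvRotStep [a,b,c,d,e,f,g,h,i,j] [a,b,c,d,e,f,g,h,i,j] = [b,c,d,e,f,g,h,i,j,a] := by
  have hr : PySem.List.pyRange 0 (9 : Int) 1 = [0,1,2,3,4,5,6,7,8] := by decide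
  unfold pvRotStep
  norm_num [hr]
  norm_num [pysem, Int.toNat, List.set]
  simp [PySem.List.pySetD, PySem.List.pySet?, PySem.List.pyIdx?]

lemma pvDig_step (k : Nat) : pvRotStep (pvDig k) (pvDig k) = pvDig (k + 1) := by
  unfold pvDig
  rw [pvRotStep_explicit]
  simp only [List.cons.injEq, and_true]
  and_intros <;> · congr 1; omega

lemma pvRotLoop_dig (f k : Nat) : pvRotLoop f (pvDig k) (pvDig k) = pvDig (k + f) := by
  induction f generalizing k with
  | zero => rfl
  | succ n ih =>
      show pvRotLoop n (pvRotStep (pvDig k) (pvDig k)) (pvRotStep (pvDig k) (pvDig k)) = _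
      rw [pvDig_step, ih]
      congr 1
      omega

lemma pvRotateLeft_eq (n : Int) : pvRotateLeft "0123456789".toList n = pvDig n.toNat := by
  have h0 : "0123456789".toList = pvDig 0 := by decide
  unfold pvRotateLeft
  rw [h0, pvRotLoop_dig]
  congr 1
  omega

set_option maxHeartbeats 1000000 in
lemma pvTable_explicit (k : Nat) : pvBuildTable "0123456789".toList (pvDig k) = PySem.Dict.mk
    [('0', Char.ofNat (48 + (0 + k) % 10)), ('1', Char.ofNat (48 + (1 + k) % 10)),
     ('2', Char.ofNat (48 + (2 + k) % 10)), ('3', Char.ofNat (48 + (3 + k) % 10)),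
     ('4', Char.ofNat (48 + (4 + k) % 10)), ('5', Char.ofNat (48 + (5 + k) % 10)),
     ('6', Char.ofNat (48 + (6 + k) % 10)), ('7', Char.ofNat (48 + (7 + k) % 10)),
     ('8', Char.ofNat (48 + (8 + k) % 10)), ('9', Char.ofNat (48 + (9 + k) % 10))] := by
  have hr : PySem.List.pyRange 0 (PySem.List.len ("0123456789".toList)) 1 = [0,1,2,3,4,5,6,7,8,9] := by decide
  unfold pvBuildTable
  rw [hr]
  rfl

lemma pvTable_get (k : Nat) (c : Char) (hc : PySem.Chars.isdigit c = true) :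
    (pvBuildTable "0123456789".toList (pvDig k)).get? c = some (pvF k c) := by
  obtain ⟨h1, h2⟩ := digit_bounds c hc
  rw [pvTable_explicit]
  unfold pvF
  interval_cases hn : c.toNat
  all_goals first
    | rw [show c = '0' from char_toNat_eq c '0' (by rw [hn]; rfl)]
    | rw [show c = '1' from char_toNat_eq c '1' (by rw [hn]; rfl)]
    | rw [show c = '2' from char_toNat_eq c '2' (by rw [hn]; rfl)]
    | rw [show c = '3' from char_toNat_eq c '3' (by rw [hn]; rfl)]
    | rw [show c = '4' from char_toNat_eq c '4' (by rw [hn]; rfl)]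
    | rw [show c = '5' from char_toNat_eq c '5' (by rw [hn]; rfl)]
    | rw [show c = '6' from char_toNat_eq c '6' (by rw [hn]; rfl)]
    | rw [show c = '7' from char_toNat_eq c '7' (by rw [hn]; rfl)]
    | rw [show c = '8' from char_toNat_eq c '8' (by rw [hn]; rfl)]
    | rw [show c = '9' from char_toNat_eq c '9' (by rw [hn]; rfl)]
  all_goals simp [PySem.Dict.get?_mk_cons]

lemma pvRot13_eq_map (chars : List Char) (rotations : Int)
    (hd : ∀ c ∈ chars, PySem.Chars.isdigit c = true) :
    pvRot13number_b chars rotations = chars.map (pvF rotations.toNat) := by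
  unfold pvRot13number_b
  rw [pvRotateLeft_eq]
  have hfold := PySem.List.foldl_append_singleton_eq_map
    (fun char => ((pvBuildTable "0123456789".toList (pvDig rotations.toNat)).get? char).getD char) chars ([] : List Char)
  simp only [List.nil_append] at hfold
  rw [hfold]
  apply List.map_congr_left
  intro c hcmem
  rw [pvTable_get rotations.toNat c (hd c hcmem)]
  rfl

lemma pvCollect_loop (s : List Char) : ∀ (base : Int) (a : List Char) (b : List Int),
    (PySem.List.enumerate s base).foldl
      (fun (p : List Char × List Int) q =>
        if PySem.Chars.isdigit q.2 then (p.1 ++ [q.2], p.2 ++ [q.1]) else p) (a, b)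
    = (a ++ s.filter PySem.Chars.isdigit, b ++ pvColI s base) := by
  induction s with
  | nil => intro base a b; simp [PySem.List.enumerate_nil, pvColI]
  | cons c rest ih =>
      intro base a b
      rw [PySem.List.enumerate_cons]
      by_cases hc : PySem.Chars.isdigit c
      · simp only [List.foldl_cons, hc, if_true]
        rw [ih]
        simp [hc, pvColI]
      · simp only [List.foldl_cons, hc]
        rw [ih]
        simp [hc, pvColI]

lemma pvPort_loop1 (s : List Char) :
    (PySem.List.pyRange 0 ((s.length : Int)) 1).foldl
      (fun (p : List Char × List Int) index =>
        if PySem.Chars.isdigit (PySem.List.pyGetD s index ' ')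
        then (p.1 ++ [PySem.List.pyGetD s index ' '], p.2 ++ [index]) else p)
      ([], [])
    = (s.filter PySem.Chars.isdigit, pvColI s 0) := by
  have h := pvCollect_loop s 0 [] []
  rw [PySem.List.enumerate_eq_map_pyRange s ' ', List.foldl_map] at h
  simp only [PySem.List.len_eq] at h
  simpa using h

lemma pvFold_set_zip (cs : List Char) : ∀ (idxs : List Int) (l0 : List Char), idxs.length = cs.length →
    (List.range cs.length).foldl
      (fun l k => PySem.List.pySetD l (idxs.getD k 0) (cs.getD k ' ')) l0
    = (idxs.zip cs).foldl (fun l p => PySem.List.pySetD l p.1 p.2) l0 := by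
  induction cs with
  | nil => intro idxs l0 h; simp
  | cons c rest ih =>
      intro idxs l0 h
      match idxs with
      | [] => simp at h
      | i :: is =>
        simp only [List.length_cons]
        rw [List.range_succ_eq_map]
        simp only [List.foldl_cons, List.foldl_map, List.getD_cons_zero, List.getD_cons_succ,
          List.zip_cons_cons]
        exact ih is _ (by simpa using h)

lemma pvSet_append (pre rest : List Char) (c v : Char) :
    (pre ++ c :: rest).set pre.length v = pre ++ v :: rest := by
  rw [List.set_append]
  simp

lemma pvReinsert (f : Char → Char) (s : List Char) : ∀ (pre : List Char),
    ((pvColI s (pre.length : Int)).zip ((s.filter PySem.Chars.isdigit).map f)).foldl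
      (fun l p => PySem.List.pySetD l p.1 p.2) (pre ++ s)
    = pre ++ s.map (fun c => if PySem.Chars.isdigit c then f c else c) := by
  induction s with
  | nil => intro pre; simp [pvColI]
  | cons c rest ih =>
      intro pre
      by_cases hc : PySem.Chars.isdigit c
      · simp only [pvColI, hc, if_true, List.filter_cons, List.map_cons, List.zip_cons_cons,
          List.foldl_cons]
        rw [PySem.List.pySetD_natCast, pvSet_append]
        have heq : (pre.length : Int) + 1 = ((pre ++ [f c]).length : Int) := by
          simp
        rw [heq]
        have := ih (pre ++ [f c])
        simp only [List.append_assoc, List.singleton_append] at this ⊢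
        rw [this]
      · have hIH := ih (pre ++ [c])
        simp only [List.append_assoc, List.singleton_append] at hIH
        have heq : ((pre ++ [c]).length : Int) = (pre.length : Int) + 1 := by simp
        rw [heq] at hIH
        simp only [pvColI, List.filter_cons, hc, Bool.false_eq_true, if_false, List.map_cons]
        exact hIH

lemma pvColI_length (s : List Char) : ∀ base, (pvColI s base).length = (s.filter PySem.Chars.isdigit).length := by
  induction s with
  | nil => intro base; simp [pvColI]
  | cons c rest ih =>
      intro base
      by_cases hc : PySem.Chars.isdigit c <;> simp [pvColI, hc, ih]

set_option maxHeartbeats 1000000 in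
lemma pvAltTable_explicit (shift : Int) : pvAltTable shift = PySem.Dict.mk
    [("0", PySem.Int.toStr (PySem.Int.mod (0 + shift) 10)), ("1", PySem.Int.toStr (PySem.Int.mod (1 + shift) 10)),
     ("2", PySem.Int.toStr (PySem.Int.mod (2 + shift) 10)), ("3", PySem.Int.toStr (PySem.Int.mod (3 + shift) 10)),
     ("4", PySem.Int.toStr (PySem.Int.mod (4 + shift) 10)), ("5", PySem.Int.toStr (PySem.Int.mod (5 + shift) 10)),
     ("6", PySem.Int.toStr (PySem.Int.mod (6 + shift) 10)), ("7", PySem.Int.toStr (PySem.Int.mod (7 + shift) 10)),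
     ("8", PySem.Int.toStr (PySem.Int.mod (8 + shift) 10)), ("9", PySem.Int.toStr (PySem.Int.mod (9 + shift) 10))] := by
  have hr : PySem.List.pyRange 0 (10 : Int) 1 = [0,1,2,3,4,5,6,7,8,9] := by decide
  unfold pvAltTable
  rw [hr]
  rfl

lemma pvToStr_small (v : Int) (h0 : 0 ≤ v) (h1 : v < 10) :
    (PySem.Int.toStr v).toList = [Char.ofNat (48 + v.toNat)] := by
  interval_cases v <;> decide

lemma pvMod_arith (m : Nat) (rotations : Int) :
    PySem.Int.mod ((m : Int) + (if rotations > 0 then PySem.Int.mod rotations 10 else 0)) 10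
      = ((m + rotations.toNat) % 10 : Nat) := by
  have h10 : (0 : Int) < 10 := by norm_num
  by_cases hr : rotations > 0
  · simp only [hr, if_true]
    rw [PySem.Int.mod_eq_emod_of_pos h10, PySem.Int.mod_eq_emod_of_pos h10]
    omega
  · simp only [hr, if_false]
    rw [PySem.Int.mod_eq_emod_of_pos h10]
    omega

lemma pvAltTable_get (shift : Int) (c : Char) (hc : PySem.Chars.isdigit c = true) :
    (pvAltTable shift).get? (String.ofList [c])
      = some (PySem.Int.toStr (PySem.Int.mod (((c.toNat - 48 : Nat) : Int) + shift) 10)) := by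
  obtain ⟨h1, h2⟩ := digit_bounds c hc
  rw [pvAltTable_explicit]
  interval_cases hn : c.toNat
  all_goals first
    | rw [show c = '0' from char_toNat_eq c '0' (by rw [hn]; rfl)]
    | rw [show c = '1' from char_toNat_eq c '1' (by rw [hn]; rfl)]
    | rw [show c = '2' from char_toNat_eq c '2' (by rw [hn]; rfl)]
    | rw [show c = '3' from char_toNat_eq c '3' (by rw [hn]; rfl)]
    | rw [show c = '4' from char_toNat_eq c '4' (by rw [hn]; rfl)]
    | rw [show c = '5' from char_toNat_eq c '5' (by rw [hn]; rfl)]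
    | rw [show c = '6' from char_toNat_eq c '6' (by rw [hn]; rfl)]
    | rw [show c = '7' from char_toNat_eq c '7' (by rw [hn]; rfl)]
    | rw [show c = '8' from char_toNat_eq c '8' (by rw [hn]; rfl)]
    | rw [show c = '9' from char_toNat_eq c '9' (by rw [hn]; rfl)]
  all_goals simp [PySem.Dict.get?_mk_cons,
    show String.ofList ['0'] = "0" from rfl, show String.ofList ['1'] = "1" from rfl,
    show String.ofList ['2'] = "2" from rfl, show String.ofList ['3'] = "3" from rfl,
    show String.ofList ['4'] = "4" from rfl, show String.ofList ['5'] = "5" from rfl,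
    show String.ofList ['6'] = "6" from rfl, show String.ofList ['7'] = "7" from rfl,
    show String.ofList ['8'] = "8" from rfl, show String.ofList ['9'] = "9" from rfl]

lemma pvAlt_eq (string : String) (rotations : Int) :
    shift_numbers_alt string rotations = String.ofList (string.toList.map (pvG rotations.toNat)) := by
  unfold shift_numbers_alt
  dsimp only
  congr 1
  have hpiece : ∀ c : Char,
      (if PySem.Chars.isdigit c
        then (((pvAltTable (if rotations > 0 then PySem.Int.mod rotations 10 else 0)).get?
                (String.ofList [c])).getD (String.ofList [c])).toList
        else [c]) = [pvG rotations.toNat c] := by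
    intro c
    by_cases hc : PySem.Chars.isdigit c
    · obtain ⟨hb1, hb2⟩ := digit_bounds c hc
      rw [if_pos hc, pvAltTable_get _ c hc]
      simp only [Option.getD_some]
      rw [pvMod_arith (c.toNat - 48) rotations]
      rw [pvToStr_small _ (by positivity) (by exact_mod_cast Nat.mod_lt _ (by norm_num))]
      simp only [pvG, hc, if_true, pvF, Int.toNat_natCast]
    · simp [hc, pvG]
  calc (string.toList.foldl
          (fun acc c => acc ++ (if PySem.Chars.isdigit c
            then (((pvAltTable (if rotations > 0 then PySem.Int.mod rotations 10 else 0)).get?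
                    (String.ofList [c])).getD (String.ofList [c])).toList
            else [c])) [])
      = string.toList.foldl (fun acc c => acc ++ [pvG rotations.toNat c]) [] := by
        apply PySem.List.foldl_congr_mem
        intro acc c hcmem
        rw [hpiece c]
    _ = string.toList.map (pvG rotations.toNat) := by
        simpa using PySem.List.foldl_append_singleton_eq_map (pvG rotations.toNat) string.toList []

lemma pvFold_set_zip' (cs : List Char) (idxs : List Int) (l0 : List Char)
    (h : idxs.length = cs.length) :
    (PySem.List.pyRange 0 ((cs.length : Int)) 1).foldl
      (fun l index => PySem.List.pySetD l (PySem.List.pyGetD idxs index 0) (PySem.List.pyGetD cs index ' ')) l0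
    = (idxs.zip cs).foldl (fun l p => PySem.List.pySetD l p.1 p.2) l0 := by
  rw [PySem.List.pyRange_one, List.foldl_map]
  simp only [Int.sub_zero, Int.toNat_natCast, zero_add, PySem.List.pyGetD_natCast]
  exact pvFold_set_zip cs idxs l0 h

theorem shift_numbers_spec : Claim_equal_shift_numbers := by
  intro string rotations _
  unfold Spec_shift_numbers
  rw [pvAlt_eq]
  unfold shift_numbers
  dsimp only
  rw [show PySem.Str.len string = ((string.toList.length : Int)) from PySem.Str.len_eq string]
  rw [pvPort_loop1 string.toList]
  rw [pvRot13_eq_map _ rotations (fun c hc => List.of_mem_filter hc)]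
  simp only [PySem.List.len_eq, List.length_map]
  rw [show ((string.toList.filter PySem.Chars.isdigit).length : Int)
       = (((string.toList.filter PySem.Chars.isdigit).map (pvF rotations.toNat)).length : Int) by simp]
  rw [pvFold_set_zip' _ _ _ (by simp [pvColI_length])]
  have := pvReinsert (pvF rotations.toNat) string.toList []
  simp only [List.length_nil, Nat.cast_zero, List.nil_append] at this
  rw [this]
  rfl
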